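-- pv_equiv track=rewrite | github.com/posl/comment_recommendation | script/mod_gen/1_time/zh/122_B/8.py | getStrLen
-- ===== SOURCE A (Python) =====
-- def getStrLen(str):
--     maxLen = 0
--     count = 0
--     for i in range(len(str)):
--         if str[i] == 'A' or str[i] == 'C' or str[i] == 'G' or str[i] == 'T':
--             count += 1
--             if count > maxLen:
--                 maxLen = count
--         else:
--             count = 0
--     return maxLen
-- ===== SOURCE B (Python) =====
-- def getStrLen(str):
--     # two-pointer scan: skip over each maximal ACGT run in one jump
--     best = 0
--     i = 0
--     n = len(str)
--     while i < n:
--         if str[i] in 'ACGT':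
--             j = i + 1
--             while j < n and str[j] in 'ACGT':
--                 j += 1
--             best = max(best, j - i)
--             i = j
--         else:
--             i += 1
--     return best
-- ===== Notes on version B (the rewrite author's own statement) =====
-- stated objective: alternative
-- what changed: B replaces A's per-character running counter with a two-pointer scan that locates each maximal ACGT run with an inner advance loop and folds max over run lengths.
import Mathlib
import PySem

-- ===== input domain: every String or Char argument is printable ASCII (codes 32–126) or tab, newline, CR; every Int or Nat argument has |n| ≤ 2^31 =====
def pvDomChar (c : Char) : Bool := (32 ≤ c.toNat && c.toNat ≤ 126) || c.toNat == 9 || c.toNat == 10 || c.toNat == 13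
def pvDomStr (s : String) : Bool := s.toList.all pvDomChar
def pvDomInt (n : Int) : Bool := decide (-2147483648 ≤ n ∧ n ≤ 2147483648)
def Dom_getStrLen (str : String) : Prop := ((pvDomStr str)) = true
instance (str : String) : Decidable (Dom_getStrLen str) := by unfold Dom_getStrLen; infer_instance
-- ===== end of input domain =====

-- B is an alternative algorithm: a two-pointer scan that jumps over each maximal ACGT run,
-- instead of A's per-character running counter. Return values proved equal on all inputs.

-- ===== PORT A =====
-- A's loop 'for i in range(len(str))' reads str[i] for every index in order; it is
-- transcribed exactly as a left fold over the character list with state (maxLen, count).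
def pvStepA (st : Int × Int) (c : Char) : Int × Int :=
  if c = 'A' ∨ c = 'C' ∨ c = 'G' ∨ c = 'T' then
    let count := st.2 + 1
    (if count > st.1 then count else st.1, count)
  else (st.1, 0)

def getStrLen (str : String) : Int :=
  (str.toList.foldl pvStepA (0, 0)).1

-- ===== PORT B =====
-- inner while loop of B: length of the leading ACGT run (j advances while chars match)
def pvRunLen : List Char → Nat
  | [] => 0
  | c :: t => if c ∈ ['A', 'C', 'G', 'T'] then pvRunLen t + 1 else 0

-- outer while loop of B: at an ACGT char, measure the run, fold max, jump past it
def pvGo : List Char → Int → Int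
  | [], best => best
  | c :: t, best =>
    if c ∈ ['A', 'C', 'G', 'T'] then
      let j : Int := (pvRunLen t : Int) + 1
      pvGo (t.drop (pvRunLen t)) (max best j)
    else pvGo t best
termination_by cs => cs.length
decreasing_by
  · simp [List.length_drop]
  · simp

def getStrLen_alt (str : String) : Int := pvGo str.toList 0

-- ===== PRECONDITION & SPEC =====
def Spec_getStrLen (str : String) (out : Int) : Prop := out = getStrLen_alt str
instance (str : String) (out : Int) : Decidable (Spec_getStrLen str out) := by unfold Spec_getStrLen; infer_instance

-- ===== CLAIM (what is proved, stated in full; the proofs are below) =====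
def Claim_equal_getStrLen : Prop := ∀ (str : String), Dom_getStrLen str → Spec_getStrLen str (getStrLen str)

-- ===== LEMMAS AND PROOFS =====

-- the two ports' ACGT tests agree
lemma pv_cond_iff (c : Char) : c ∈ (['A', 'C', 'G', 'T'] : List Char) ↔ (c = 'A' ∨ c = 'C' ∨ c = 'G' ∨ c = 'T') := by
  simp

-- A's fold over a leading ACGT run: the counter climbs by the run length, the max absorbs it
lemma pv_run (t : List Char) : ∀ m c : Int, c ≤ m →
    List.foldl pvStepA (m, c) t
      = List.foldl pvStepA (max m (c + pvRunLen t), c + pvRunLen t) (t.drop (pvRunLen t)) := by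
  induction t with
  | nil =>
    intro m c h
    simp only [pvRunLen, Nat.cast_zero, add_zero, List.drop_nil, List.foldl_nil]
    rw [max_eq_left h]
  | cons d t ih =>
    intro m c h
    by_cases hd : d ∈ (['A', 'C', 'G', 'T'] : List Char)
    · have hd' : d = 'A' ∨ d = 'C' ∨ d = 'G' ∨ d = 'T' := (pv_cond_iff d).1 hd
      simp only [pvRunLen, if_pos hd]
      have hstep : pvStepA (m, c) d = (max m (c + 1), c + 1) := by
        simp only [pvStepA, if_pos hd']
        rw [Prod.mk.injEq]
        exact ⟨by split_ifs <;> omega, rfl⟩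
      rw [List.foldl_cons, hstep, ih (max m (c + 1)) (c + 1) (le_max_right _ _)]
      have h1 : max (max m (c + 1)) (c + 1 + (pvRunLen t : Int)) = max m (c + ((pvRunLen t : Nat) + 1 : Nat)) := by
        push_cast; omega
      have h2 : c + 1 + (pvRunLen t : Int) = c + ((pvRunLen t : Nat) + 1 : Nat) := by push_cast; ring
      rw [h1, h2]
      simp [List.drop_succ_cons]
    · have hd' : ¬(d = 'A' ∨ d = 'C' ∨ d = 'G' ∨ d = 'T') := fun h' => hd ((pv_cond_iff d).2 h')
      simp only [pvRunLen, if_neg hd, Nat.cast_zero, add_zero, List.drop_zero]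
      rw [max_eq_left h]

-- after dropping the leading run, the next char (if any) is not ACGT
lemma pv_drop_head (t : List Char) :
    ∀ d t', t.drop (pvRunLen t) = d :: t' → d ∉ (['A', 'C', 'G', 'T'] : List Char) := by
  induction t with
  | nil => intro d t' h; simp at h
  | cons e t ih =>
    intro d t' h
    by_cases he : e ∈ (['A', 'C', 'G', 'T'] : List Char)
    · simp only [pvRunLen, if_pos he, List.drop_succ_cons] at h
      exact ih d t' h
    · simp only [pvRunLen, if_neg he, List.drop_zero] at h
      cases h; exact he

-- main invariant: A's fold from (m, 0) computes B's run-skipping loop from best = m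
lemma pv_main (n : Nat) : ∀ cs : List Char, cs.length ≤ n → ∀ m : Int, 0 ≤ m →
    (List.foldl pvStepA (m, 0) cs).1 = pvGo cs m := by
  induction n with
  | zero =>
    intro cs h m _
    have : cs = [] := List.eq_nil_of_length_eq_zero (Nat.le_zero.1 h)
    subst this; simp [pvGo]
  | succ n ih =>
    intro cs h m hm
    cases cs with
    | nil => simp [pvGo]
    | cons c t =>
      by_cases hc : c ∈ (['A', 'C', 'G', 'T'] : List Char)
      · have hc' : c = 'A' ∨ c = 'C' ∨ c = 'G' ∨ c = 'T' := (pv_cond_iff c).1 hc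
        have hstep : pvStepA (m, 0) c = (max m 1, 1) := by
          simp only [pvStepA, if_pos hc']
          rw [Prod.mk.injEq]
          exact ⟨by split_ifs <;> omega, rfl⟩
        have hrun := pv_run t (max m 1) 1 (by omega)
        have hgo : pvGo (c :: t) m = pvGo (t.drop (pvRunLen t)) (max m ((pvRunLen t : Int) + 1)) := by
          rw [pvGo, if_pos hc]
        rw [List.foldl_cons, hstep, hrun, hgo]
        have hmax : max (max m 1) (1 + (pvRunLen t : Int)) = max m ((pvRunLen t : Int) + 1) := by
          omega
        rw [hmax]
        rcases hdrop : t.drop (pvRunLen t) with _ | ⟨d, t'⟩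
        · simp [pvGo]
        · have hd : d ∉ (['A', 'C', 'G', 'T'] : List Char) := pv_drop_head t d t' hdrop
          have hd' : ¬(d = 'A' ∨ d = 'C' ∨ d = 'G' ∨ d = 'T') := fun h' => hd ((pv_cond_iff d).2 h')
          have hstepd : pvStepA (max m ((pvRunLen t : Int) + 1), 1 + (pvRunLen t : Int)) d
              = (max m ((pvRunLen t : Int) + 1), 0) := by
            simp [pvStepA, if_neg hd']
          have hlen : t'.length ≤ n := by
            have h1 : (d :: t').length ≤ t.length := by
              rw [← hdrop]; simp [List.length_drop]
            simp at h1 h ⊢; omega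
          rw [List.foldl_cons, hstepd, ih t' hlen _ (by omega)]
          rw [pvGo, if_neg hd]
      · have hc' : ¬(c = 'A' ∨ c = 'C' ∨ c = 'G' ∨ c = 'T') := fun h' => hc ((pv_cond_iff c).2 h')
        have hstep : pvStepA (m, 0) c = (m, 0) := by simp [pvStepA, if_neg hc']
        have hlen : t.length ≤ n := by simp at h; omega
        rw [List.foldl_cons, hstep, ih t hlen m hm]
        rw [pvGo, if_neg hc]

-- ===== VERDICT (by name: the statement is the Claim_ definition above) =====
theorem getStrLen_spec : Claim_equal_getStrLen := by
  intro str _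
  unfold Spec_getStrLen getStrLen getStrLen_alt
  exact pv_main str.toList.length str.toList le_rfl 0 le_rfl
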